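-- pv_equiv track=rewrite | github.com/ruby-kim/Kor2Num | korNum/chgFormat.py | separate_each_num_text_to_list
-- ===== SOURCE A (Python) =====
-- def separate_each_num_text_to_list(text, Lists, unitKorNum):
--     result = list()
--     for cardList in Lists:
--         wordList = list()
--         tmp = ""
--         for i in range(cardList[1] - 1, cardList[0] - 1, -1):
--             if text[i] not in unitKorNum:
--                 wordList.append(text[i] + tmp)
--                 tmp = ""
--             else:
--                 if i != cardList[0] and text[i - 1] in unitKorNum:
--                     wordList.append(text[i])
--                     continue
--                 tmp = text[i] + tmp
--                 if i == cardList[0]: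
--                     wordList.append(tmp)
--         wordList.reverse()
--         result.append(wordList)
--     return result
-- ===== SOURCE B (Python) =====
-- def separate_each_num_text_to_list(text, Lists, unitKorNum):
--     def tokens(chars):
--         if not chars:
--             return []
--         if len(chars) >= 2 and chars[0] not in unitKorNum and chars[1] in unitKorNum:
--             return [chars[0] + chars[1]] + tokens(chars[2:])
--         return [chars[0]] + tokens(chars[1:])
--     return [tokens([text[i] for i in range(cl[0], cl[1])]) for cl in Lists]
-- ===== Notes on version B (the rewrite author's own statement) =====
-- stated objective: simpler
-- what changed: B first extracts each index range into a character list and then tokenises it by structural recursion that peels one or two characters per step (a non-unit followed by a unit becomes one two-character token, anything else a single-character token), replacing A's backward index scan with the pending 'tmp' accumulator, the continue/start special cases and the final wordList.reverse().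
import Mathlib
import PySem

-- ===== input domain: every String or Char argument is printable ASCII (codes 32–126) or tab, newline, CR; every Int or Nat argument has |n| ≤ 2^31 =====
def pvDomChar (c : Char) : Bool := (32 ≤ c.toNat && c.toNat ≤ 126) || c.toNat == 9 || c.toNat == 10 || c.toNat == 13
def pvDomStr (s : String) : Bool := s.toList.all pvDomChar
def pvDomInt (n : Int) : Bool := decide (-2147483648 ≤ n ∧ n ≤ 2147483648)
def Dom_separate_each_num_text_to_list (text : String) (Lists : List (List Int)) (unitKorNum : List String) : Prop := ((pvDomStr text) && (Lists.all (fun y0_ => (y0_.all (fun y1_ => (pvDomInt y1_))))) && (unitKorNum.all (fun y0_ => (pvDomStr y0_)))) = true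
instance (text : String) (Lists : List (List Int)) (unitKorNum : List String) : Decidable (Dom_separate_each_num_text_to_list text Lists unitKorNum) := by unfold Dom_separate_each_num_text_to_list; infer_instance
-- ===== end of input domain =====

-- B extracts each range into a character list and tokenises it by a structural recursion
-- that peels one or two characters per step, replacing A's backward scan + tmp accumulator
-- + final reverse (objective: simpler).

-- ===== PORT A =====
def separate_each_num_text_to_list (text : String) (Lists : List (List Int)) (unitKorNum : List String) : List (List String) :=
  Lists.foldl (fun result cardList =>
    let c0 : Int := (PySem.List.pyGet? cardList 0).getD 0
    let c1 : Int := (PySem.List.pyGet? cardList 1).getD 0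
    let st := (PySem.List.pyRange (c1 - 1) (c0 - 1) (-1)).foldl
      (fun (s : List (List Char) × List Char) i =>
        let ch : Char := (PySem.List.pyGet? text.toList i).getD ' '
        if String.ofList [ch] ∉ unitKorNum then (s.1 ++ [ch :: s.2], [])
        else if i ≠ c0 ∧ String.ofList [(PySem.List.pyGet? text.toList (i-1)).getD ' '] ∈ unitKorNum then
          (s.1 ++ [[ch]], s.2)
        else
          -- tmp = text[i] + tmp; if i == cardList[0]: wordList.append(tmp)
          if i = c0 then (s.1 ++ [ch :: s.2], ch :: s.2) else (s.1, ch :: s.2))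
      ([], [])
    result ++ [st.1.reverse.map (fun t => String.ofList t)]) []

-- ===== PORT B =====
-- helper 'tokens' of Source B: structural recursion on the extracted character list
def pvTokensB (unitKorNum : List String) : List Char → List String
  | [] => []
  | [c] => [String.ofList [c]]
  | c :: c' :: rest =>
    if String.ofList [c] ∉ unitKorNum ∧ String.ofList [c'] ∈ unitKorNum then
      String.ofList [c, c'] :: pvTokensB unitKorNum rest
    else
      String.ofList [c] :: pvTokensB unitKorNum (c' :: rest)

def separate_each_num_text_to_list_alt (text : String) (Lists : List (List Int)) (unitKorNum : List String) : List (List String) :=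
  Lists.map (fun cl =>
    pvTokensB unitKorNum
      ((PySem.List.pyRange ((PySem.List.pyGet? cl 0).getD 0) ((PySem.List.pyGet? cl 1).getD 0) 1).map
        (fun i => (PySem.List.pyGet? text.toList i).getD ' ')))

-- ===== PRECONDITION & SPEC =====
-- Pre_ excludes exactly the inputs on which the Python A raises: a cardList with fewer than
-- two entries (IndexError on cardList[0]/cardList[1]), or a nonempty range whose indices
-- fall outside Python's valid index range for text (IndexError on text[i]).
def Pre_separate_each_num_text_to_list (text : String) (Lists : List (List Int)) (unitKorNum : List String) : Prop :=
  ∀ cl ∈ Lists, 2 ≤ cl.length ∧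
    (cl.getD 1 0 ≤ cl.getD 0 0 ∨
      (-(text.toList.length : Int) ≤ cl.getD 0 0 ∧ cl.getD 1 0 ≤ (text.toList.length : Int)))
instance (text : String) (Lists : List (List Int)) (unitKorNum : List String) : Decidable (Pre_separate_each_num_text_to_list text Lists unitKorNum) := by unfold Pre_separate_each_num_text_to_list; infer_instance

def pvWitness_separate_each_num_text_to_list : String × List (List Int) × List String := ("x1y12z", [[0, 4], [4, 6]], ["1", "2"])

def Spec_separate_each_num_text_to_list (text : String) (Lists : List (List Int)) (unitKorNum : List String) (out : List (List String)) : Prop := out = separate_each_num_text_to_list_alt text Lists unitKorNum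
instance (text : String) (Lists : List (List Int)) (unitKorNum : List String) (out : List (List String)) : Decidable (Spec_separate_each_num_text_to_list text Lists unitKorNum out) := by unfold Spec_separate_each_num_text_to_list; infer_instance

-- ===== CLAIM (what is proved, stated in full; the proofs are below) =====
def Claim_equal_separate_each_num_text_to_list : Prop := ∀ (text : String) (Lists : List (List Int)) (unitKorNum : List String), Dom_separate_each_num_text_to_list text Lists unitKorNum → Pre_separate_each_num_text_to_list text Lists unitKorNum → Spec_separate_each_num_text_to_list text Lists unitKorNum (separate_each_num_text_to_list text Lists unitKorNum)

-- ===== LEMMAS AND PROOFS =====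

-- One processed position, as the pair (its char, its left neighbour char if the position is
-- not the first of the range).
def pvU (unitKorNum : List String) (c : Char) : Bool := decide (String.ofList [c] ∈ unitKorNum)
def pvF (text : String) (i : Int) : Char := (PySem.List.pyGet? text.toList i).getD ' '
def pvG (text : String) (c0 : Int) (i : Int) : Char × Option Char :=
  (pvF text i, if i = c0 then none else some (pvF text (i-1)))

-- A's inner-loop body, rephrased on pairs.
def pvStepA (u : Char → Bool) (s : List (List Char) × List Char) (q : Char × Option Char) : List (List Char) × List Char :=
  if ¬ u q.1 then (s.1 ++ [q.1 :: s.2], [])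
  else if q.2.any u then (s.1 ++ [[q.1]], s.2)
  else if q.2.isNone then (s.1 ++ [q.1 :: s.2], q.1 :: s.2) else (s.1, q.1 :: s.2)

-- Links between consecutive pairs of a range.
def pvR : (Char × Option Char) → (Char × Option Char) → Prop := fun q q' => q'.2 = some q.1

-- The token list of a consistent pair list (a unit whose left neighbour exists and is
-- not a unit is "pending": it belongs to the token of its left neighbour, outside the list).
def pvTok (u : Char → Bool) : List (Char × Option Char) → List (List Char)
  | [] => []
  | [(c, p)] => if u c then (if p.any u || p.isNone then [[c]] else []) else [[c]]
  | (c, p) :: (c', p') :: rest' =>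
    if u c then
      if p.any u || p.isNone then [c] :: pvTok u ((c', p') :: rest') else pvTok u ((c', p') :: rest')
    else
      if u c' then [c, c'] :: pvTok u rest' else [c] :: pvTok u ((c', p') :: rest')

def pvPend (u : Char → Bool) : List (Char × Option Char) → List Char
  | [] => []
  | (c, p) :: _ => if u c && !p.any u then [c] else []

theorem pvTok_unit (u : Char → Bool) (c : Char) (p : Option Char) (rest : List (Char × Option Char))
    (hc : u c = true) :
    pvTok u ((c, p) :: rest) = if p.any u || p.isNone then [c] :: pvTok u rest else pvTok u rest := by
  cases rest with
  | nil => cases hp : p.any u || p.isNone <;> simp [pvTok, hc, hp]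
  | cons q1 rest' => obtain ⟨c1, p1⟩ := q1; simp [pvTok, hc]

theorem pvLemA (u : Char → Bool) : ∀ (ps : List (Char × Option Char)) (wl₀ : List (List Char)),
    List.IsChain pvR ps →
    List.foldl (pvStepA u) (wl₀, []) ps.reverse = (wl₀ ++ (pvTok u ps).reverse, pvPend u ps) := by
  intro ps
  induction ps with
  | nil => intro wl₀ _; simp [pvTok, pvPend]
  | cons q rest ih =>
    obtain ⟨c, p⟩ := q
    intro wl₀ hch
    have hr : List.IsChain pvR rest := hch.tail
    rw [List.reverse_cons, List.foldl_append, ih wl₀ hr]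
    simp only [List.foldl_cons, List.foldl_nil]
    cases rest with
    | nil =>
      by_cases hc : u c
      · cases p with
        | none => simp [pvStepA, pvTok, pvPend, hc]
        | some cp => by_cases hcp : u cp <;> simp [pvStepA, pvTok, pvPend, hc, hcp]
      · simp [pvStepA, pvTok, pvPend, hc]
    | cons q1 rest' =>
      obtain ⟨c1, p1⟩ := q1
      have hp1 : p1 = some c := (List.isChain_cons_cons.mp hch).1
      subst hp1
      by_cases hc : u c
      · cases p with
        | none =>
          by_cases hc1 : u c1 <;>
            simp [pvStepA, pvTok, pvPend, pvTok_unit, hc, hc1]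
        | some cp =>
          by_cases hcp : u cp <;> by_cases hc1 : u c1 <;>
            simp [pvStepA, pvTok, pvPend, pvTok_unit, hc, hcp, hc1]
      · by_cases hc1 : u c1 <;>
          simp [pvStepA, pvTok, pvPend, pvTok_unit, hc, hc1]

theorem pvChain (text : String) (c0 : Int) : ∀ (n : Nat) (a b : Int), c0 ≤ a → (b - a).toNat = n →
    List.IsChain pvR ((PySem.List.pyRange a b 1).map (pvG text c0)) := by
  intro n
  induction n with
  | zero =>
    intro a b _ h0
    rw [PySem.List.pyRange_one_eq_nil (by omega)]
    simp
  | succ m ih =>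
    intro a b hc0 hm
    rw [PySem.List.pyRange_one_cons (by omega), List.map_cons]
    rw [List.isChain_cons]
    refine ⟨?_, ih (a + 1) b (by omega) (by omega)⟩
    intro y hy
    by_cases hab : a + 1 < b
    · rw [PySem.List.pyRange_one_cons hab] at hy
      simp only [List.map_cons, List.head?_cons, Option.mem_def, Option.some.injEq] at hy
      subst hy
      show (pvG text c0 (a + 1)).2 = some (pvG text c0 a).1
      simp only [pvG, if_neg (by omega : ¬ (a + 1 = c0))]
      norm_num
    · rw [PySem.List.pyRange_one_eq_nil (by omega)] at hy
      simp at hy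

-- the token lists of a chain whose head is not "pending" are exactly B's pairwise peel
theorem pvTok_eq_tokens (unitKorNum : List String) :
    ∀ (n : Nat) (ps : List (Char × Option Char)), ps.length ≤ n →
    List.IsChain pvR ps →
    (∀ c p, ps.head? = some (c, p) → pvU unitKorNum c = true → (p.any (pvU unitKorNum) || p.isNone) = true) →
    (pvTok (pvU unitKorNum) ps).map String.ofList = pvTokensB unitKorNum (ps.map Prod.fst) := by
  intro n
  induction n with
  | zero =>
    intro ps hlen _ _
    have : ps = [] := List.eq_nil_of_length_eq_zero (Nat.le_zero.mp hlen)
    subst this; simp [pvTok, pvTokensB]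
  | succ m ih =>
    intro ps hlen hch hhd
    cases ps with
    | nil => simp [pvTok, pvTokensB]
    | cons q rest =>
      obtain ⟨c, p⟩ := q
      cases rest with
      | nil =>
        by_cases hc : pvU unitKorNum c
        · have := hhd c p rfl hc
          simp [pvTok, pvTokensB, hc, this]
        · simp [pvTok, pvTokensB, hc]
      | cons q1 rest' =>
        obtain ⟨c1, p1⟩ := q1
        have hp1 : p1 = some c := (List.isChain_cons_cons.mp hch).1
        subst hp1
        have hchT : List.IsChain pvR ((c1, some c) :: rest') := hch.tail
        by_cases hc : pvU unitKorNum c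
        · have hok := hhd c p rfl hc
          have hmem : String.ofList [c] ∈ unitKorNum := by simpa [pvU] using hc
          have ihT := ih ((c1, some c) :: rest') (by simpa using Nat.le_of_succ_le_succ hlen) hchT
            (by
              intro c' p' h h'
              simp only [List.head?_cons, Option.some.injEq, Prod.mk.injEq] at h
              obtain ⟨rfl, rfl⟩ := h
              simp [Option.any, hc])
          have e : pvTok (pvU unitKorNum) ((c, p) :: (c1, some c) :: rest')
              = [c] :: pvTok (pvU unitKorNum) ((c1, some c) :: rest') := by
            simp [pvTok, hc, hok]
          rw [e, List.map_cons, ihT]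
          simp [pvTokensB, hmem]
        · have hnmem : String.ofList [c] ∉ unitKorNum := by simpa [pvU] using hc
          by_cases hc1 : pvU unitKorNum c1
          · have hmem1 : String.ofList [c1] ∈ unitKorNum := by simpa [pvU] using hc1
            have hchR : List.IsChain pvR rest' := hchT.tail
            have ihR := ih rest' (by simp at hlen; omega) hchR
              (by
                intro c' p' h h'
                cases rest' with
                | nil => simp at h
                | cons q2 rest'' =>
                  obtain ⟨c2, p2⟩ := q2
                  have hp2 : p2 = some c1 := (List.isChain_cons_cons.mp hchT).1
                  subst hp2
                  simp only [List.head?_cons, Option.some.injEq, Prod.mk.injEq] at h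
                  obtain ⟨rfl, rfl⟩ := h
                  simp [Option.any, hc1])
            have e : pvTok (pvU unitKorNum) ((c, p) :: (c1, some c) :: rest')
                = [c, c1] :: pvTok (pvU unitKorNum) rest' := by
              simp [pvTok, hc, hc1]
            rw [e, List.map_cons, ihR]
            simp [pvTokensB, hnmem, hmem1]
          · have hnmem1 : String.ofList [c1] ∉ unitKorNum := by simpa [pvU] using hc1
            have ihT := ih ((c1, some c) :: rest') (by simpa using Nat.le_of_succ_le_succ hlen) hchT
              (by
                intro c' p' h h'
                simp only [List.head?_cons, Option.some.injEq, Prod.mk.injEq] at h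
                obtain ⟨rfl, rfl⟩ := h
                simp [pvU] at h'
                exact absurd h' hnmem1)
            have e : pvTok (pvU unitKorNum) ((c, p) :: (c1, some c) :: rest')
                = [c] :: pvTok (pvU unitKorNum) ((c1, some c) :: rest') := by
              simp [pvTok, hc, hc1]
            rw [e, List.map_cons, ihT]
            simp [pvTokensB, hnmem, hnmem1]

-- per-segment equality: A's backward fold, reversed, equals B's tokens of the segment
theorem pvSeg (text : String) (unitKorNum : List String) (c0 c1 : Int) :
    ((PySem.List.pyRange (c1 - 1) (c0 - 1) (-1)).foldl
      (fun (s : List (List Char) × List Char) i =>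
        let ch : Char := (PySem.List.pyGet? text.toList i).getD ' '
        if String.ofList [ch] ∉ unitKorNum then (s.1 ++ [ch :: s.2], [])
        else if i ≠ c0 ∧ String.ofList [(PySem.List.pyGet? text.toList (i-1)).getD ' '] ∈ unitKorNum then
          (s.1 ++ [[ch]], s.2)
        else
          if i = c0 then (s.1 ++ [ch :: s.2], ch :: s.2) else (s.1, ch :: s.2))
      ([], [])).1.reverse.map (fun t => String.ofList t)
    = pvTokensB unitKorNum ((PySem.List.pyRange c0 c1 1).map
        (fun i => (PySem.List.pyGet? text.toList i).getD ' ')) := by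
  have hA : (fun (s : List (List Char) × List Char) (i : Int) =>
      let ch : Char := (PySem.List.pyGet? text.toList i).getD ' '
      if String.ofList [ch] ∉ unitKorNum then (s.1 ++ [ch :: s.2], ([] : List Char))
      else if i ≠ c0 ∧ String.ofList [(PySem.List.pyGet? text.toList (i-1)).getD ' '] ∈ unitKorNum then
        (s.1 ++ [[ch]], s.2)
      else
        if i = c0 then (s.1 ++ [ch :: s.2], ch :: s.2) else (s.1, ch :: s.2))
      = fun s i => pvStepA (pvU unitKorNum) s (pvG text c0 i) := by
    funext s i
    by_cases hic : i = c0 <;>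
      simp [pvStepA, pvU, pvG, pvF, hic]
  rw [hA]
  have hch := pvChain text c0 (c1 - c0).toNat c0 c1 (le_refl c0) rfl
  rw [PySem.List.pyRange_neg_one_eq_reverse]
  have e1 : c0 - 1 + 1 = c0 := by ring
  have e2 : c1 - 1 + 1 = c1 := by ring
  rw [e1, e2]
  rw [← List.foldl_map]
  have hmr : List.map (pvG text c0) ((PySem.List.pyRange c0 c1 1).reverse)
      = (List.map (pvG text c0) (PySem.List.pyRange c0 c1 1)).reverse := by simp
  rw [hmr, pvLemA (pvU unitKorNum) _ [] hch]
  have hhd : ∀ c p, ((PySem.List.pyRange c0 c1 1).map (pvG text c0)).head? = some (c, p) →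
      pvU unitKorNum c = true → (p.any (pvU unitKorNum) || p.isNone) = true := by
    intro c p h _
    by_cases hlt : c0 < c1
    · rw [PySem.List.pyRange_one_cons hlt] at h
      simp only [List.map_cons, List.head?_cons, Option.some.injEq] at h
      have : p = none := by
        have := congrArg Prod.snd h
        simpa [pvG] using this.symm
      simp [this]
    · rw [PySem.List.pyRange_one_eq_nil (by omega)] at h
      simp at h
  have htok := pvTok_eq_tokens unitKorNum ((PySem.List.pyRange c0 c1 1).map (pvG text c0)).length
    ((PySem.List.pyRange c0 c1 1).map (pvG text c0)) (le_refl _) hch hhd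
  simp only [List.nil_append, List.reverse_reverse]
  rw [htok]
  congr 1
  simp [List.map_map, Function.comp, pvG, pvF]

theorem pvFoldl_append_map {α β : Type} (f : α → β) :
    ∀ (l : List α) (acc : List β), l.foldl (fun r x => r ++ [f x]) acc = acc ++ l.map f := by
  intro l
  induction l with
  | nil => intro acc; simp
  | cons x xs ih => intro acc; simp [ih]

-- ===== VERDICT (by name: the statement is the Claim_ definition above) =====
theorem separate_each_num_text_to_list_spec : Claim_equal_separate_each_num_text_to_list := by
  intro text Lists unitKorNum _ _
  unfold Spec_separate_each_num_text_to_list separate_each_num_text_to_list separate_each_num_text_to_list_alt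
  rw [pvFoldl_append_map]
  simp only [List.nil_append]
  congr 1
  funext cardList
  dsimp only
  exact pvSeg text unitKorNum ((PySem.List.pyGet? cardList 0).getD 0) ((PySem.List.pyGet? cardList 1).getD 0)
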